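-- pv_equiv track=rewrite | github.com/vhvistad/advent_of_code | knowit/2020/6/main.py | julegodt
-- ===== SOURCE A (Python) =====
-- def julegodt(pakkeliste, alver):
--   pr_alv = 0
--   tmp = 0
--   rest = 0
--   for antall in pakkeliste:
--     antall = int(antall) + rest
--     tmp = tmp + antall // alver
--     rest = antall % alver
--     if rest == 0:
--       pr_alv += tmp
--       tmp = 0
--   return pr_alv
-- ===== SOURCE B (Python) =====
-- def julegodt(pakkeliste, alver):
--   tall = [int(a) for a in pakkeliste]
--   prefikser = []
--   total = 0
--   for a in tall:
--     total += a
--     prefikser.append(total)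
--   delelige = [s for s in prefikser if s % alver == 0]
--   return delelige[-1] // alver if delelige else 0
-- ===== Notes on version B (the rewrite author's own statement) =====
-- stated objective: alternative
-- what changed: B replaces A's single-pass quotient/remainder carry (tmp/rest with a flush on rest==0) by staged passes: parse all ints, build the prefix-sum list, filter the prefix sums divisible by alver, and return the last one divided by alver (0 if none).
import Mathlib
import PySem

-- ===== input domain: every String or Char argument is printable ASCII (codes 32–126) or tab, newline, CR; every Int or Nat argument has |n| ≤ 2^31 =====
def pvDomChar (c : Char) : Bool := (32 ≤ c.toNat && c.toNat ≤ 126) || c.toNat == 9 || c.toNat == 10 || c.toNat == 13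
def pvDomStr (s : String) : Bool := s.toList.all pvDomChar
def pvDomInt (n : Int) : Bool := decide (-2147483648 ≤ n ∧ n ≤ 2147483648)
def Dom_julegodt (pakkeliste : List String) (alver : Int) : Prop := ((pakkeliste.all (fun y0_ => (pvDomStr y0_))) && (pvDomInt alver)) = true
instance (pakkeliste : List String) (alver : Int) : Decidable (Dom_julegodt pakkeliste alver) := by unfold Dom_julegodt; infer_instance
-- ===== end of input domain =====

-- B replaces A's single-pass quotient/remainder carry (tmp/rest with a flush on rest==0)
-- by staged passes: parse ints, build prefix sums, filter those divisible by alver,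
-- return the last one divided by alver (0 if none). Alternative decomposition, same O(n).


-- ===== PORT A =====
-- loop body of A: state (pr_alv, tmp, rest)
def julegodtStep (alver : Int) (st : Int × Int × Int) (antall : String) : Int × Int × Int :=
  let a := (PySem.Int.ofStr? antall).getD 0 + st.2.2   -- int(antall) + rest; Pre_ guarantees parse succeeds
  let tmp := st.2.1 + PySem.Int.floordiv a alver
  let rest := PySem.Int.mod a alver
  if rest = 0 then (st.1 + tmp, 0, rest) else (st.1, tmp, rest)

def julegodt (pakkeliste : List String) (alver : Int) : Int :=
  (pakkeliste.foldl (julegodtStep alver) (0, 0, 0)).1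

-- ===== PORT B =====
def julegodt_alt (pakkeliste : List String) (alver : Int) : Int :=
  let tall := pakkeliste.map (fun a => (PySem.Int.ofStr? a).getD 0)
  let prefikser := (tall.foldl (fun (st : Int × List Int) a =>
      (st.1 + a, st.2 ++ [st.1 + a])) ((0 : Int), ([] : List Int))).2
  let delelige := prefikser.filter (fun s => PySem.Int.mod s alver == 0)
  match delelige.getLast? with
  | some s => PySem.Int.floordiv s alver
  | none => 0

-- ===== PRECONDITION & SPEC =====
-- Pre_ excludes exactly the inputs on which A raises: a non-int-parsable string (ValueError)
-- and alver = 0 with a nonempty list (ZeroDivisionError at the first element).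
def Pre_julegodt (pakkeliste : List String) (alver : Int) : Prop :=
  (pakkeliste.all (fun s => (PySem.Int.ofStr? s).isSome)) = true ∧ (pakkeliste = [] ∨ alver ≠ 0)
instance (pakkeliste : List String) (alver : Int) : Decidable (Pre_julegodt pakkeliste alver) := by unfold Pre_julegodt; infer_instance

def pvWitness_julegodt : List String × Int := (["3", "4", "5"], 2)

def Spec_julegodt (pakkeliste : List String) (alver : Int) (out : Int) : Prop := out = julegodt_alt pakkeliste alver
instance (pakkeliste : List String) (alver : Int) (out : Int) : Decidable (Spec_julegodt pakkeliste alver out) := by unfold Spec_julegodt; infer_instance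

-- ===== CLAIM (what is proved, stated in full; the proofs are below) =====
def Claim_equal_julegodt : Prop := ∀ (pakkeliste : List String) (alver : Int), Dom_julegodt pakkeliste alver → Pre_julegodt pakkeliste alver → Spec_julegodt pakkeliste alver (julegodt pakkeliste alver)

-- ===== LEMMAS AND PROOFS =====

-- Proof-only middle form: a flush-free single pass over the parsed ints, state (total, svar).
def bStep (alver : Int) (st : Int × Int) (a : Int) : Int × Int :=
  if PySem.Int.mod (st.1 + a) alver = 0 then (st.1 + a, PySem.Int.floordiv (st.1 + a) alver)
  else (st.1 + a, st.2)

-- Proof-only: the prefix sums of l starting from running total S.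
def prefixSums (S : Int) : List Int → List Int
  | [] => []
  | a :: l => (S + a) :: prefixSums (S + a) l

-- Step 1: A's fold equals the flush-free fold over the parsed ints.
-- Invariant: A's state is (q, tmp, S.fmod alver) with q + tmp = S.fdiv alver.
lemma julegodt_loop (alver : Int) (ha : alver ≠ 0) (l : List String) :
    ∀ (S q tmp : Int), q + tmp = S.fdiv alver →
    (l.foldl (julegodtStep alver) (q, tmp, Int.fmod S alver)).1
      = ((l.map (fun a => (PySem.Int.ofStr? a).getD 0)).foldl (bStep alver) (S, q)).2 := by
  induction l with
  | nil => intro S q tmp _; rfl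
  | cons x l ih =>
    intro S q tmp h
    have hS : S + (PySem.Int.ofStr? x).getD 0
        = ((PySem.Int.ofStr? x).getD 0 + Int.fmod S alver) + alver * S.fdiv alver := by
      have := Int.fmod_def S alver; linarith
    have hmod : Int.fmod (S + (PySem.Int.ofStr? x).getD 0) alver
        = Int.fmod ((PySem.Int.ofStr? x).getD 0 + Int.fmod S alver) alver := by
      rw [hS, Int.add_mul_fmod_self_left]
    have hdiv : Int.fdiv (S + (PySem.Int.ofStr? x).getD 0) alver
        = Int.fdiv ((PySem.Int.ofStr? x).getD 0 + Int.fmod S alver) alver + S.fdiv alver := by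
      rw [hS, Int.add_mul_fdiv_left _ _ ha]
    rw [List.map_cons, List.foldl_cons, List.foldl_cons]
    simp only [julegodtStep, bStep, PySem.Int.mod, PySem.Int.floordiv]
    by_cases h0 : Int.fmod ((PySem.Int.ofStr? x).getD 0 + Int.fmod S alver) alver = 0
    · rw [if_pos h0, if_pos (hmod.trans h0), ← hmod]
      have he : q + (tmp + Int.fdiv ((PySem.Int.ofStr? x).getD 0 + Int.fmod S alver) alver)
          = Int.fdiv (S + (PySem.Int.ofStr? x).getD 0) alver := by rw [hdiv]; linarith
      rw [← he]
      exact ih (S + (PySem.Int.ofStr? x).getD 0) _ 0 (by rw [add_zero]; exact he)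
    · rw [if_neg h0, if_neg (fun hc => h0 (hmod.symm.trans hc)), ← hmod]
      exact ih (S + (PySem.Int.ofStr? x).getD 0) q
        (tmp + Int.fdiv ((PySem.Int.ofStr? x).getD 0 + Int.fmod S alver) alver)
        (by rw [hdiv]; linarith)

-- B's append-building fold produces acc ++ the prefix sums.
lemma prefiks_fold (l : List Int) : ∀ (S : Int) (acc : List Int),
    (l.foldl (fun (st : Int × List Int) a => (st.1 + a, st.2 ++ [st.1 + a])) (S, acc)).2
      = acc ++ prefixSums S l := by
  induction l with
  | nil => intro S acc; simp [prefixSums]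
  | cons a l ih => intro S acc; simp [prefixSums, ih (S + a) (acc ++ [S + a])]

lemma getLast?_cons_elim {α β : Type} (x : α) (xs : List α) (q : β) (f : α → β) :
    ((x :: xs).getLast?.elim q f) = (xs.getLast?.elim (f x) f) := by
  cases xs with
  | nil => rfl
  | cons y ys =>
    rw [List.getLast?_cons_cons]
    cases h : (y :: ys).getLast? with
    | none => simp at h
    | some z => rfl

-- Step 2: the flush-free fold equals "last divisible prefix sum, floor-divided".
lemma bStep_eq_filter_last (alver : Int) (l : List Int) : ∀ (S q : Int),
    (l.foldl (bStep alver) (S, q)).2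
      = ((prefixSums S l).filter (fun s => PySem.Int.mod s alver == 0)).getLast?.elim q
          (fun s => PySem.Int.floordiv s alver) := by
  induction l with
  | nil => intro S q; rfl
  | cons a l ih =>
    intro S q
    rw [List.foldl_cons]
    simp only [bStep, prefixSums, List.filter_cons]
    by_cases h0 : PySem.Int.mod (S + a) alver = 0
    · rw [if_pos h0, if_pos (by simpa using h0), getLast?_cons_elim, ih]
    · rw [if_neg h0, if_neg (by simpa using h0), ih]

-- ===== VERDICT (by name: the statement is the Claim_ definition above) =====
theorem julegodt_spec : Claim_equal_julegodt := by
  intro pakkeliste alver _ hpre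
  unfold Spec_julegodt julegodt julegodt_alt
  rcases hpre.2 with hnil | ha
  · subst hnil; rfl
  · have h0 : (0 : Int) = Int.fmod 0 alver := by simp
    have hA : (pakkeliste.foldl (julegodtStep alver) (0, 0, 0)).1
        = ((pakkeliste.map (fun a => (PySem.Int.ofStr? a).getD 0)).foldl (bStep alver) (0, 0)).2 := by
      calc (pakkeliste.foldl (julegodtStep alver) (0, 0, 0)).1
          = (pakkeliste.foldl (julegodtStep alver) (0, 0, Int.fmod 0 alver)).1 := by rw [← h0]
        _ = _ := julegodt_loop alver ha pakkeliste 0 0 0 (by simp)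
    rw [hA, bStep_eq_filter_last]
    simp only [prefiks_fold, List.nil_append]
    cases hlast : ((prefixSums 0 (pakkeliste.map fun a => (PySem.Int.ofStr? a).getD 0)).filter
        (fun s => PySem.Int.mod s alver == 0)).getLast? <;> simp
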